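-- pv_equiv track=rewrite | github.com/devashish94/Coding-Practice | python-code/coding/testing.py | check
-- ===== SOURCE A (Python) =====
-- def check(output: list[int], value: int) -> bool:
--     m = {}
--     for i in output:
--         m[i] = m.get(i, 0) + 1
--     count = 0
--     for item in m.keys():
--         if item + value in m.keys():
--             count += 1
--     return False if count > 0 else True
-- ===== SOURCE B (Python) =====
-- def check(output: list[int], value: int) -> bool:
--     uniq = sorted(set(output))
--     d = abs(value)
--     i = j = 0
--     while j < len(uniq):
--         diff = uniq[j] - uniq[i]
--         if diff == d:
--             return False
--         elif diff < d:
--             j += 1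
--         else:
--             i += 1
--     return True
-- ===== Notes on version B (the rewrite author's own statement) =====
-- stated objective: alternative
-- what changed: Replaces the hash-map build plus per-key membership loop with sorted(set(output)) and a two-pointer sweep over the sorted distinct values searching for a pair at distance abs(value).
import Mathlib
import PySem

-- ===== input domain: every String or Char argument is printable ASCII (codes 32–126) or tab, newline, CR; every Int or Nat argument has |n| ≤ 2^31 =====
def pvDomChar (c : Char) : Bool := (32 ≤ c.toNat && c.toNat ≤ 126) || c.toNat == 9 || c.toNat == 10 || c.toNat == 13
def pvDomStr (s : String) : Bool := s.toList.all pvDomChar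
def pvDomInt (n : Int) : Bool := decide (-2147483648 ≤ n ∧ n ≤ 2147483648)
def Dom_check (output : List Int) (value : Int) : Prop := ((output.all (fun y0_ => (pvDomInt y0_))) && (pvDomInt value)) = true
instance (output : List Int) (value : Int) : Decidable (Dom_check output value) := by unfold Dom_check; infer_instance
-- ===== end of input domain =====

-- B replaces A's dict build + per-key hash-membership loop by a two-pointer sweep over
-- sorted(set(output)) looking for a pair at distance abs(value) (alternative algorithm, same result).

-- ===== PORT A =====
def check (output : List Int) (value : Int) : Bool :=
  -- m = {}; for i in output: m[i] = m.get(i, 0) + 1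
  let m := output.foldl (fun d i => d.modify i 0 (· + 1)) (PySem.Dict.empty : PySem.Dict Int Int)
  -- count = 0; for item in m.keys(): if item + value in m.keys(): count += 1
  let count := m.keys.foldl
    (fun c item => if (m.keys).contains (item + value) then c + 1 else c) (0 : Int)
  -- return False if count > 0 else True
  if count > 0 then false else true

-- ===== PORT B =====
-- the while loop of Source B; fuel only makes the recursion total (2*|u|+1 always suffices: each
-- step increments i or j, both are bounded by |u| along the run — proved in the lemmas below)
def twoPtr (u : List Int) (d : Int) : Nat → Nat → Nat → Bool
  | 0, _, _ => true
  | fuel + 1, i, j =>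
    if j < u.length then
      let diff := u.getD j 0 - u.getD i 0
      if diff = d then false
      else if diff < d then twoPtr u d fuel i (j + 1)
      else twoPtr u d fuel (i + 1) j
    else true

def check_alt (output : List Int) (value : Int) : Bool :=
  -- uniq = sorted(set(output)); d = abs(value); i = j = 0; while j < len(uniq): …
  let uniq := PySem.List.sorted (PySem.Set.ofList output) (fun x => x) false
  twoPtr uniq |value| (2 * uniq.length + 1) 0 0

-- ===== PRECONDITION & SPEC =====
def Spec_check (output : List Int) (value : Int) (out : Bool) : Prop := out = check_alt output value
instance (output : List Int) (value : Int) (out : Bool) : Decidable (Spec_check output value out) := by unfold Spec_check; infer_instance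

-- ===== CLAIM (what is proved, stated in full; the proofs are below) =====
def Claim_equal_check : Prop := ∀ (output : List Int) (value : Int), Dom_check output value → Spec_check output value (check output value)

-- ===== LEMMAS AND PROOFS =====

-- the "no pair at distance d" property on the sorted distinct list
def NoPair (u : List Int) (d : Int) : Prop :=
  ∀ p q, p < u.length → q < u.length → u.getD q 0 - u.getD p 0 ≠ d

lemma getD_mono {u : List Int} (hs : u.Pairwise (· < ·)) {p q : Nat}
    (hpq : p ≤ q) (hq : q < u.length) : u.getD p 0 ≤ u.getD q 0 := by
  rcases eq_or_lt_of_le hpq with rfl | h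
  · exact le_refl _
  · rw [List.getD_eq_getElem _ _ (lt_of_le_of_lt hpq hq), List.getD_eq_getElem _ _ hq]
    exact le_of_lt ((List.pairwise_iff_getElem.mp hs) p q _ hq h)

lemma twoPtr_correct {u : List Int} (hs : u.Pairwise (· < ·)) {d : Int} (hd : 0 ≤ d) :
    ∀ fuel i j, i ≤ j →
      (u.length - i) + (u.length - j) + 1 ≤ fuel →
      (∀ p q, p < i → q < u.length → u.getD q 0 - u.getD p 0 ≠ d) →
      (∀ q, q < j → u.getD q 0 - u.getD i 0 < d) →
      (twoPtr u d fuel i j = true ↔ NoPair u d) := by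
  intro fuel
  induction fuel with
  | zero => intro i j _ hf _ _; omega
  | succ fuel ih =>
    intro i j hij hf hA hB
    by_cases hjlen : j < u.length
    · have hilen : i < u.length := lt_of_le_of_lt hij hjlen
      simp only [twoPtr, hjlen, if_true]
      set diff := u.getD j 0 - u.getD i 0 with hdiff
      by_cases h1 : diff = d
      · simp only [h1]
        constructor
        · intro h; cases h
        · intro hnp; exact absurd h1 (hnp i j hilen hjlen)
      · simp only [if_neg h1]
        by_cases h2 : diff < d
        · simp only [if_pos h2]
          refine ih i (j + 1) (by omega) (by omega) hA ?_
          intro q hq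
          rcases Nat.lt_succ_iff_lt_or_eq.mp hq with h | rfl
          · exact hB q h
          · exact h2
        · simp only [if_neg h2]
          have hij' : i < j := by
            rcases eq_or_lt_of_le hij with rfl | h
            · exfalso; apply h2; simp only [hdiff]; omega
            · exact h
          refine ih (i + 1) j hij' (by omega) ?_ ?_
          · intro p q hp hq
            rcases Nat.lt_succ_iff_lt_or_eq.mp hp with h | rfl
            · exact hA p q h hq
            · by_cases hqj : q < j
              · exact ne_of_lt (hB q hqj)
              · have := getD_mono hs (Nat.le_of_not_lt hqj) hq
                omega
          · intro q hq
            have h1j : i + 1 ≤ j := hij'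
            have := getD_mono hs h1j hjlen
            have hqd := hB q hq
            have hmono : u.getD i 0 ≤ u.getD (i+1) 0 := getD_mono hs (by omega) (by omega)
            omega
    · simp only [twoPtr, hjlen, if_false]
      have hjlen' : u.length ≤ j := Nat.le_of_not_lt hjlen
      constructor
      · intro _ p q hp hq
        by_cases hpi : p < i
        · exact hA p q hpi hq
        · have hip : i ≤ p := Nat.le_of_not_lt hpi
          have h1 : u.getD q 0 - u.getD i 0 < d := hB q (lt_of_lt_of_le hq hjlen')
          have h2 : u.getD i 0 ≤ u.getD p 0 := getD_mono hs hip hp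
          omega
      · intro _; trivial

-- A's counting fold computes countP
lemma foldl_count (K : List Int) (p : Int → Bool) :
    ∀ c0 : Int, K.foldl (fun c item => if p item then c + 1 else c) c0
      = c0 + (K.countP p : Int) := by
  induction K with
  | nil => intro c0; simp
  | cons x xs ih =>
    intro c0
    by_cases h : p x
    · simp [List.foldl_cons, h, ih]; ring
  
    · simp [List.foldl_cons, h, ih]

-- characterisation of A: true iff no element has element+value also present (on the distinct set)
lemma check_char (output : List Int) (value : Int) :
    check output value = decide (∀ x ∈ PySem.Set.ofList output, x + value ∉ PySem.Set.ofList output) := by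
  -- the counting fold on output IS Dict.counter (counter_eq_foldl is rfl)
  have h1 : check output value
      = (if ((PySem.Dict.counter output).keys.foldl
              (fun c item => if ((PySem.Dict.counter output).keys).contains (item + value)
                             then c + 1 else c) (0 : Int)) > 0
         then false else true) := by
    unfold check
    rw [PySem.Dict.counter_eq_foldl]
  rw [h1, PySem.Dict.keys_counter, foldl_count]
  set S := PySem.Set.ofList output with hS
  by_cases h : ∀ x ∈ S, x + value ∉ S
  · have hc : List.countP (fun item => List.contains S (item + value)) S = 0 := by
      rw [List.countP_eq_zero]
      intro a ha
      simpa using h a ha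
    rw [hc]
    simpa using h
  · have hc : 0 < List.countP (fun item => List.contains S (item + value)) S := by
      rw [List.countP_pos_iff]
      push Not at h
      obtain ⟨x, hx, hmem⟩ := h
      exact ⟨x, hx, by simpa using hmem⟩
    have hgt : (0 : Int) + (List.countP (fun item => List.contains S (item + value)) S : Int) > 0 := by
      exact_mod_cast Nat.lt_of_lt_of_le hc (by omega)
    rw [if_pos hgt]
    simp [h]

-- the set-level property is equivalent to the index-level NoPair on the sorted distinct list
lemma nopair_iff (output : List Int) (value : Int) :
    (NoPair (PySem.List.sorted (PySem.Set.ofList output) (fun x => x) false) |value|)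
      ↔ (∀ x ∈ PySem.Set.ofList output, x + value ∉ PySem.Set.ofList output) := by
  set S := PySem.Set.ofList output with hS
  set u := PySem.List.sorted S (fun x => x) false with hu
  have hmem : ∀ x : Int, x ∈ u ↔ x ∈ S := fun x => PySem.List.mem_sorted S (fun x => x) false x
  constructor
  · intro hnp x hx hx'
    obtain ⟨p, hp, hup⟩ := List.mem_iff_getElem.mp ((hmem x).mpr hx)
    obtain ⟨q, hq, huq⟩ := List.mem_iff_getElem.mp ((hmem (x + value)).mpr hx')
    by_cases hv : 0 ≤ value
    · apply hnp p q hp hq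
      rw [List.getD_eq_getElem _ _ hq, List.getD_eq_getElem _ _ hp, hup, huq]
      rw [abs_of_nonneg hv]; ring
    · push Not at hv
      apply hnp q p hq hp
      rw [List.getD_eq_getElem _ _ hp, List.getD_eq_getElem _ _ hq, hup, huq]
      rw [abs_of_neg hv]; ring
  · intro h p q hp hq heq
    have hxp : u.getD p 0 ∈ S := (hmem _).mp (by
      rw [List.getD_eq_getElem _ _ hp]; exact List.getElem_mem hp)
    have hxq : u.getD q 0 ∈ S := (hmem _).mp (by
      rw [List.getD_eq_getElem _ _ hq]; exact List.getElem_mem hq)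
    by_cases hv : 0 ≤ value
    · apply h (u.getD p 0) hxp
      have : u.getD p 0 + value = u.getD q 0 := by rw [abs_of_nonneg hv] at heq; omega
      rw [this]; exact hxq
    · push Not at hv
      apply h (u.getD q 0) hxq
      have : u.getD q 0 + value = u.getD p 0 := by rw [abs_of_neg hv] at heq; omega
      rw [this]; exact hxp

-- characterisation of B
lemma check_alt_char (output : List Int) (value : Int) :
    check_alt output value = decide (∀ x ∈ PySem.Set.ofList output, x + value ∉ PySem.Set.ofList output) := by
  unfold check_alt
  set u := PySem.List.sorted (PySem.Set.ofList output) (fun x => x) false with hu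
  have hs : u.Pairwise (· < ·) := PySem.List.sorted_ofList_pairwise_lt output
  have hiff : twoPtr u |value| (2 * u.length + 1) 0 0 = true ↔ NoPair u |value| := by
    apply twoPtr_correct hs (abs_nonneg value)
    · exact le_refl 0
    · omega
    · intro p q hp; omega
    · intro q hq; omega
  rw [nopair_iff] at hiff
  by_cases h : ∀ x ∈ PySem.Set.ofList output, x + value ∉ PySem.Set.ofList output
  · exact (hiff.mpr h).trans (decide_eq_true h).symm
  · rw [decide_eq_false h]
    show twoPtr u |value| (2 * u.length + 1) 0 0 = false
    rcases Bool.eq_false_or_eq_true (twoPtr u |value| (2 * u.length + 1) 0 0) with hb | hb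
    · exact absurd (hiff.mp hb) h
    · exact hb

-- ===== VERDICT (by name: the statement is the Claim_ definition above) =====
theorem check_spec : Claim_equal_check := by
  intro output value _
  unfold Spec_check
  rw [check_char, check_alt_char]
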